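-- pv_equiv track=rewrite | github.com/Shkityrk/EGE | ЕГЭ по номерам/Задание 25/k8.py | f
-- ===== SOURCE A (Python) =====
-- def f(n):
--     s=[]
--     if n%2==0:s.append(n)
--     for i in range(2,int(n**0.5)+1):
--         if n%i==0:
--             if i%2==0:s.append(i)
--             if (n//i)%2==0:s.append(n//i)
--
--     return sorted(set(s))
-- ===== SOURCE B (Python) =====
-- def f(n):
--     # even divisors of n are exactly 2*d for the divisors d of m = n//2 (n even);
--     # collect the small/large divisor pairs of m up to sqrt(m): already sorted, no set/sort needed
--     if n % 2:
--         return []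
--     m = n // 2
--     small = []
--     large = []
--     i = 1
--     while i * i <= m:
--         if m % i == 0:
--             small.append(2 * i)
--             if i != m // i:
--                 large.append(2 * (m // i))
--         i += 1
--     return small + large[::-1]
-- ===== Notes on version B (the rewrite author's own statement) =====
-- stated objective: alternative
-- what changed: B reduces the problem to the divisors of m=n//2 (even divisors of n are exactly 2*d for d dividing m) and collects the sqrt-paired small/large divisor lists in order, so the result is sorted and duplicate-free by construction and A's set()+sorted() pass disappears.
-- intended difference: For n=0 A returns [0] (the unconditional 'n%2==0: s.append(n)' appends 0 itself), while B returns []: 0 is not a positive even divisor of anything, so the empty list is the intended value. — e.g. on f(0): A returns [0], B returns []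
import Mathlib
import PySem

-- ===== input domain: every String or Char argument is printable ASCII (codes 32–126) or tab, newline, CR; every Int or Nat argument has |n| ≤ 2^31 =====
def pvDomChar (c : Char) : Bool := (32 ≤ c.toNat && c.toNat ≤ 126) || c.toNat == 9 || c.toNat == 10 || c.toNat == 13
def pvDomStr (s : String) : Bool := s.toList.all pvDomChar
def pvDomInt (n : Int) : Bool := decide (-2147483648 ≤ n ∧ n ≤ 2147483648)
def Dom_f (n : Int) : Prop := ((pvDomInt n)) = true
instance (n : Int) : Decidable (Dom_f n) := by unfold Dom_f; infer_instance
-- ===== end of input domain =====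

-- B replaces A's parity-filtered sqrt(n) collection plus set()+sorted() by the sqrt-paired
-- small/large divisor lists of m = n//2 (even divisors of n are exactly 2*d, d | m), which are
-- sorted and duplicate-free by construction (objective: alternative algorithm, similar cost).

-- ===== PORT A =====
-- int(n**0.5) is ported as Int.sqrt: exact for 0 ≤ n ≤ 2^31 (CPython's pow agrees with isqrt
-- there, checked by dense+random sampling); for n < 0 Python raises TypeError (outside Pre_f).
def f (n : Int) : List Int :=
  let s : List Int := if PySem.Int.mod n 2 = 0 then [n] else []
  let s := (PySem.List.pyRange 2 (Int.sqrt n + 1) 1).foldl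
    (fun s i =>
      if PySem.Int.mod n i = 0 then
        let s := if PySem.Int.mod i 2 = 0 then s ++ [i] else s
        if PySem.Int.mod (PySem.Int.floordiv n i) 2 = 0 then s ++ [PySem.Int.floordiv n i]
        else s
      else s) s
  PySem.List.sorted (PySem.Set.ofList s) (fun x => x) false

-- ===== PORT B =====
-- the 'while i * i <= m' loop of Source B, carrying the (small, large) accumulator pair
-- (fuel is only a structural totality guard: m+1 exceeds the loop's iteration count)
def fAltLoop (fuel : Nat) (m i : Int) (small large : List Int) : List Int × List Int :=
  match fuel with
  | 0 => (small, large)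
  | fuel + 1 =>
    if i * i ≤ m then
      if PySem.Int.mod m i = 0 then
        fAltLoop fuel m (i + 1) (small ++ [2 * i])
          (if i ≠ PySem.Int.floordiv m i then large ++ [2 * PySem.Int.floordiv m i] else large)
      else fAltLoop fuel m (i + 1) small large
    else (small, large)

def f_alt (n : Int) : List Int :=
  if PySem.Int.mod n 2 ≠ 0 then []
  else
    let m := PySem.Int.floordiv n 2
    let p := fAltLoop (m.toNat + 1) m 1 [] []
    p.1 ++ (PySem.List.slice? p.2 none none (-1)).getD []

-- ===== PRECONDITION & SPEC =====
-- Pre_f excludes exactly n < 0, where A raises TypeError (int() of the complex value n**0.5).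
def Pre_f (n : Int) : Prop := 0 ≤ n
instance (n : Int) : Decidable (Pre_f n) := by unfold Pre_f; infer_instance
def pvWitness_f : Int := 12

-- For n = 0 A returns [0] (the unconditional 'n%2==0: s.append(n)' appends 0 itself), while B
-- returns []: 0 is not a positive even divisor of anything, so the empty list is the intended value.
def D_f (n : Int) : Prop := n = 0
instance (n : Int) : Decidable (D_f n) := by unfold D_f; infer_instance
def Spec_f (n : Int) (out : List Int) : Prop := ¬ D_f n → out = f_alt n
instance (n : Int) (out : List Int) : Decidable (Spec_f n out) := by unfold Spec_f; infer_instance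
def pvDiffWitness_f : Int := 0
def pvDiffWitnessOut_f : (List Int) × (List Int) := ([0], [])

-- ===== CLAIM =====
def Claim_unchanged_f : Prop := ∀ (n : Int), Dom_f n → Pre_f n → Spec_f n (f n)
def Claim_changed_f : Prop := Dom_f (pvDiffWitness_f) ∧ Pre_f (pvDiffWitness_f) ∧ D_f (pvDiffWitness_f) ∧ f (pvDiffWitness_f) = pvDiffWitnessOut_f.1 ∧ f_alt (pvDiffWitness_f) = pvDiffWitnessOut_f.2 ∧ pvDiffWitnessOut_f.1 ≠ pvDiffWitnessOut_f.2
def Claim_exact_f : Prop := ∀ (n : Int), Dom_f n → Pre_f n → D_f n → f n ≠ f_alt n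

-- ===== LEMMAS AND PROOFS =====

theorem sqrt_nonneg' (n : Int) : 0 ≤ Int.sqrt n := by
  simp [Int.sqrt]

theorem sq_sqrt_le (n : Int) (h : 0 ≤ n) : Int.sqrt n * Int.sqrt n ≤ n := by
  have h1 := Nat.sqrt_le' n.toNat
  rw [pow_two] at h1
  have h2 : ((Nat.sqrt n.toNat * Nat.sqrt n.toNat : Nat) : Int) ≤ n := by
    rw [← Int.toNat_of_nonneg h]
    exact_mod_cast h1
  simpa [Int.sqrt, Nat.cast_mul] using h2

theorem lt_succ_sqrt' (n : Int) (h : 0 ≤ n) : n < (Int.sqrt n + 1) * (Int.sqrt n + 1) := by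
  have h1 := Nat.lt_succ_sqrt' n.toNat
  rw [pow_two] at h1
  have h2 : n < ((Nat.succ (Nat.sqrt n.toNat) * Nat.succ (Nat.sqrt n.toNat) : Nat) : Int) := by
    rw [← Int.toNat_of_nonneg h]
    exact_mod_cast h1
  have h3 : ((Nat.succ (Nat.sqrt n.toNat) : Nat) : Int) = Int.sqrt n + 1 := by
    simp [Int.sqrt, Nat.succ_eq_add_one]
  calc n < ((Nat.succ (Nat.sqrt n.toNat) * Nat.succ (Nat.sqrt n.toNat) : Nat) : Int) := h2
    _ = (Int.sqrt n + 1) * (Int.sqrt n + 1) := by push_cast at h3 ⊢; rw [h3]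

theorem sqrt_pos' (m : Int) (hm : 1 ≤ m) : 1 ≤ Int.sqrt m := by
  by_contra hc
  rw [not_le] at hc
  have h0 := sqrt_nonneg' m
  have hs : Int.sqrt m = 0 := by omega
  have := lt_succ_sqrt' m (by omega)
  rw [hs] at this
  omega

-- the body of A's fold appends a computable contribution
def bodyA (n i : Int) : List Int :=
  if PySem.Int.mod n i = 0 then
    (if PySem.Int.mod i 2 = 0 then [i] else []) ++
    (if PySem.Int.mod (PySem.Int.floordiv n i) 2 = 0 then [PySem.Int.floordiv n i] else [])
  else []

theorem foldA_eq (l : List Int) (n : Int) (s : List Int) :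
    l.foldl (fun s i =>
      if PySem.Int.mod n i = 0 then
        let s := if PySem.Int.mod i 2 = 0 then s ++ [i] else s
        if PySem.Int.mod (PySem.Int.floordiv n i) 2 = 0 then s ++ [PySem.Int.floordiv n i]
        else s
      else s) s = s ++ l.flatMap (bodyA n) := by
  induction l generalizing s with
  | nil => simp
  | cons i t ih =>
    simp only [List.foldl_cons, List.flatMap_cons, ih]
    unfold bodyA
    split_ifs <;> simp

theorem f_eq_sorted (n : Int) :
    f n = PySem.List.sorted (PySem.Set.ofList
      ((if PySem.Int.mod n 2 = 0 then ([n] : List Int) else []) ++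
        (PySem.List.pyRange 2 (Int.sqrt n + 1) 1).flatMap (bodyA n))) (fun x => x) false := by
  simp only [f]
  rw [foldA_eq]

-- membership in A's accumulated list, for 1 ≤ n: exactly the positive even divisors of n
theorem memA (n x : Int) (hn : 1 ≤ n) :
    (x ∈ (if PySem.Int.mod n 2 = 0 then ([n] : List Int) else []) ++
      (PySem.List.pyRange 2 (Int.sqrt n + 1) 1).flatMap (bodyA n)) ↔
      (2 ∣ x ∧ x ∣ n ∧ 0 < x) := by
  have hsq0 : 0 ≤ Int.sqrt n := sqrt_nonneg' n
  constructor
  · intro hx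
    rcases List.mem_append.1 hx with h | h
    · obtain ⟨hdvd2, rfl⟩ : 2 ∣ n ∧ x = n := by simpa using h
      exact ⟨hdvd2, dvd_refl _, by omega⟩
    · rcases List.mem_flatMap.1 h with ⟨i, hir, hib⟩
      rw [PySem.List.mem_pyRange_one] at hir
      have hi2 : 2 ≤ i := hir.1
      unfold bodyA at hib
      by_cases hdiv : PySem.Int.mod n i = 0
      · have hdvd : i ∣ n := (PySem.Int.mod_eq_zero_iff_dvd n i).1 hdiv
        rw [if_pos hdiv, PySem.Int.floordiv_eq_ediv_of_pos (by omega : (0:Int) < i)] at hib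
        have hin : i ≤ n := Int.le_of_dvd (by omega) hdvd
        rcases List.mem_append.1 hib with h1 | h1
        · obtain ⟨he, rfl⟩ : 2 ∣ i ∧ x = i := by simpa using h1
          exact ⟨he, hdvd, by omega⟩
        · obtain ⟨he, rfl⟩ : 2 ∣ n / i ∧ x = n / i := by simpa using h1
          refine ⟨he, ⟨i, (Int.ediv_mul_cancel hdvd).symm⟩, ?_⟩
          have h1n : 1 ≤ n / i := by
            rw [Int.le_ediv_iff_mul_le (by omega : (0:Int) < i)]
            omega
          omega
      · rw [if_neg hdiv] at hib
        simp at hib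
  · rintro ⟨h2, hdvd, hpos⟩
    have hx2 : 2 ≤ x := by
      obtain ⟨c, rfl⟩ := h2; omega
    have hxn : x ≤ n := Int.le_of_dvd (by omega) hdvd
    have hxe : PySem.Int.mod x 2 = 0 := (PySem.Int.mod_eq_zero_iff_dvd x 2).2 h2
    rw [List.mem_append]
    by_cases hxs : x ≤ Int.sqrt n
    · right
      refine List.mem_flatMap.2 ⟨x, ?_, ?_⟩
      · rw [PySem.List.mem_pyRange_one]; omega
      · unfold bodyA
        rw [if_pos ((PySem.Int.mod_eq_zero_iff_dvd n x).2 hdvd)]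
        rw [List.mem_append]
        left
        simpa using h2
    · by_cases hxn' : x = n
      · left; subst hxn'; simpa using h2
      · right
        have hmul : n / x * x = n := Int.ediv_mul_cancel hdvd
        have hi1 : 1 ≤ n / x := by
          rw [Int.le_ediv_iff_mul_le (by omega : (0:Int) < x)]
          omega
        have hine : n / x ≠ 1 := by
          intro hcontra
          rw [hcontra] at hmul
          omega
        have hi2 : 2 ≤ n / x := by omega
        have hisq : n / x ≤ Int.sqrt n := by
          by_contra hc
          rw [not_le] at hc
          have hx' : Int.sqrt n + 1 ≤ x := by omega
          have hi' : Int.sqrt n + 1 ≤ n / x := by omega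
          have hlt := lt_succ_sqrt' n (by omega)
          nlinarith
        have hidvd : n / x ∣ n := ⟨x, hmul.symm⟩
        refine List.mem_flatMap.2 ⟨n / x, ?_, ?_⟩
        · rw [PySem.List.mem_pyRange_one]; omega
        · unfold bodyA
          rw [if_pos ((PySem.Int.mod_eq_zero_iff_dvd n (n / x)).2 hidvd),
            PySem.Int.floordiv_eq_ediv_of_pos (by omega : (0:Int) < n / x)]
          have hnix : n / (n / x) = x := by
            set q := n / x with hq
            rw [← hmul]
            exact Int.mul_ediv_cancel_left x (by omega : q ≠ 0)
          rw [hnix]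
          rw [List.mem_append]
          right
          simpa using h2

-- B's accumulator lists in closed form
def smallsB (m i : Int) : List Int :=
  ((PySem.List.pyRange i (Int.sqrt m + 1) 1).filter (fun d => PySem.Int.mod m d == 0)).map
    (fun d => 2 * d)

def largesB (m i : Int) : List Int :=
  ((PySem.List.pyRange i (Int.sqrt m + 1) 1).filter
    (fun d => PySem.Int.mod m d == 0 && d != PySem.Int.floordiv m d)).map
    (fun d => 2 * PySem.Int.floordiv m d)

theorem loop_le_iff (m i : Int) (hm : 0 ≤ m) (hi : 1 ≤ i) : i * i ≤ m ↔ i ≤ Int.sqrt m := by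
  have hs0 := sqrt_nonneg' m
  constructor
  · intro h
    by_contra hc
    rw [not_le] at hc
    have h2 := lt_succ_sqrt' m hm
    nlinarith
  · intro h
    have h1 := sq_sqrt_le m hm
    nlinarith

theorem sqrt_le_self' (m : Int) (hm : 0 ≤ m) : Int.sqrt m ≤ m := by
  have h := sq_sqrt_le m hm
  have h0 := sqrt_nonneg' m
  by_cases hs : Int.sqrt m = 0
  · omega
  · nlinarith [mul_le_mul_of_nonneg_left (show (1:Int) ≤ Int.sqrt m by omega) h0]

theorem loopB_eq (m : Int) (hm : 0 ≤ m) :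
    ∀ (fuel : Nat) (i : Int), 1 ≤ i → (Int.sqrt m + 1 - i).toNat < fuel →
    ∀ small large, fAltLoop fuel m i small large = (small ++ smallsB m i, large ++ largesB m i) := by
  intro fuel
  induction fuel with
  | zero =>
    intro i hi hk small large
    omega
  | succ fuel ih =>
    intro i hi hk small large
    by_cases hle : i * i ≤ m
    · have hile : i ≤ Int.sqrt m := (loop_le_iff m i hm hi).1 hle
      have hcons : PySem.List.pyRange i (Int.sqrt m + 1) 1 =
          i :: PySem.List.pyRange (i + 1) (Int.sqrt m + 1) 1 :=
        PySem.List.pyRange_one_cons (by omega)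
      rw [fAltLoop, if_pos hle]
      by_cases hd : PySem.Int.mod m i = 0
      · rw [if_pos hd, ih (i + 1) (by omega) (by omega)]
        by_cases hne : i ≠ PySem.Int.floordiv m i
        · rw [if_pos hne]
          simp [smallsB, largesB, hcons, hd, hne]
        · rw [if_neg hne]
          rw [not_not] at hne
          simp [smallsB, largesB, hcons, hd, ← hne]
      · rw [if_neg hd, ih (i + 1) (by omega) (by omega)]
        simp [smallsB, largesB, hcons, hd]
    · have hsi : Int.sqrt m < i := by
        by_contra hc
        rw [not_lt] at hc
        exact hle ((loop_le_iff m i hm hi).2 hc)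
      have hnil : PySem.List.pyRange i (Int.sqrt m + 1) 1 = [] :=
        PySem.List.pyRange_one_eq_nil (by omega)
      rw [fAltLoop, if_neg hle]
      simp [smallsB, largesB, hnil]

theorem f_alt_eq (n : Int) (hn0 : 0 ≤ n) (hn2 : PySem.Int.mod n 2 = 0) :
    f_alt n = smallsB (PySem.Int.floordiv n 2) 1 ++ (largesB (PySem.Int.floordiv n 2) 1).reverse := by
  have hfd : PySem.Int.floordiv n 2 = n / 2 := PySem.Int.floordiv_eq_ediv_of_pos (by omega)
  have hm : 0 ≤ PySem.Int.floordiv n 2 := by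
    rw [hfd]; exact Int.ediv_nonneg hn0 (by omega)
  have hsle := sqrt_le_self' (PySem.Int.floordiv n 2) hm
  have hs0 := sqrt_nonneg' (PySem.Int.floordiv n 2)
  have hloop := loopB_eq (PySem.Int.floordiv n 2) hm
    ((PySem.Int.floordiv n 2).toNat + 1) 1 (by omega) (by omega) [] []
  rw [hfd] at hloop ⊢
  have hn2' : n % 2 = 0 := by
    rw [← PySem.Int.mod_eq_emod_of_pos (by omega : (0:Int) < 2)]
    exact hn2
  simp [f_alt, hn2', hloop, PySem.List.slice?_none_none_neg_one]

theorem memB (m x : Int) (hm : 1 ≤ m) :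
    x ∈ smallsB m 1 ++ (largesB m 1).reverse ↔ ∃ d, d ∣ m ∧ 0 < d ∧ x = 2 * d := by
  have hsq1 : 1 ≤ Int.sqrt m := sqrt_pos' m hm
  simp only [smallsB, largesB, List.mem_append, List.mem_reverse, List.mem_map, List.mem_filter,
    PySem.List.mem_pyRange_one, Bool.and_eq_true, beq_iff_eq, bne_iff_ne]
  constructor
  · rintro (⟨d, ⟨⟨hd1, hd2⟩, hdm⟩, rfl⟩ | ⟨d, ⟨⟨hd1, hd2⟩, hdm, hdne⟩, rfl⟩)
    · exact ⟨d, (PySem.Int.mod_eq_zero_iff_dvd m d).1 hdm, by omega, rfl⟩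
    · have hdvd : d ∣ m := (PySem.Int.mod_eq_zero_iff_dvd m d).1 hdm
      have hfd : PySem.Int.floordiv m d = m / d := PySem.Int.floordiv_eq_ediv_of_pos (by omega)
      have hmul : m / d * d = m := Int.ediv_mul_cancel hdvd
      have h1 : 1 ≤ m / d := by
        rw [Int.le_ediv_iff_mul_le (by omega : (0:Int) < d)]
        have := Int.le_of_dvd (by omega) hdvd
        omega
      exact ⟨m / d, ⟨d, hmul.symm⟩, by omega, by rw [hfd]⟩
  · rintro ⟨d, hdvd, hdpos, rfl⟩
    have hdm : d ≤ m := Int.le_of_dvd (by omega) hdvd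
    have hmod : PySem.Int.mod m d = 0 := (PySem.Int.mod_eq_zero_iff_dvd m d).2 hdvd
    by_cases hds : d ≤ Int.sqrt m
    · exact Or.inl ⟨d, ⟨⟨by omega, by omega⟩, hmod⟩, rfl⟩
    · right
      have hmul : m / d * d = m := Int.ediv_mul_cancel hdvd
      have hc1 : 1 ≤ m / d := by
        rw [Int.le_ediv_iff_mul_le (by omega : (0:Int) < d)]
        omega
      have hcs : m / d ≤ Int.sqrt m := by
        by_contra hc
        rw [not_le] at hc
        have hlt := lt_succ_sqrt' m (by omega)
        nlinarith
      have hcd : m / d ∣ m := ⟨d, hmul.symm⟩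
      have hfd : PySem.Int.floordiv m (m / d) = m / (m / d) :=
        PySem.Int.floordiv_eq_ediv_of_pos (by omega)
      have hrec : m / (m / d) = d := by
        set q := m / d with hq
        rw [← hmul]
        exact Int.mul_ediv_cancel_left d (by omega : q ≠ 0)
      refine ⟨m / d, ⟨⟨by omega, by omega⟩,
        (PySem.Int.mod_eq_zero_iff_dvd m (m / d)).2 hcd, ?_⟩, ?_⟩
      · rw [hfd, hrec]; omega
      · rw [hfd, hrec]

theorem div_strict_anti (m a b : Int) (hm : 1 ≤ m) (ha : a ∣ m) (hb : b ∣ m) (h0 : 0 < a)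
    (hab : a < b) : m / b < m / a := by
  have hma : m / a * a = m := Int.ediv_mul_cancel ha
  have hmb : m / b * b = m := Int.ediv_mul_cancel hb
  have h1 : 1 ≤ m / a := by
    rw [Int.le_ediv_iff_mul_le h0]
    have := Int.le_of_dvd (by omega) ha
    omega
  nlinarith

theorem cofactor_large (m e : Int) (hm : 1 ≤ m) (he1 : 1 ≤ e) (hesq : e ≤ Int.sqrt m)
    (hdvd : e ∣ m) (hne : e ≠ m / e) : Int.sqrt m + 1 ≤ m / e := by
  have hsq1 := sqrt_pos' m hm
  have hsqle := sq_sqrt_le m (by omega)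
  have hmul : m / e * e = m := Int.ediv_mul_cancel hdvd
  by_contra hc
  rw [not_le] at hc
  have h1 : 1 ≤ m / e := by
    rw [Int.le_ediv_iff_mul_le (by omega : (0:Int) < e)]
    have := Int.le_of_dvd (by omega) hdvd
    omega
  have hge : Int.sqrt m ≤ m / e := by
    by_contra hg
    rw [not_le] at hg
    nlinarith
  have heq : m / e = Int.sqrt m := by omega
  have hesq' : Int.sqrt m ≤ e := by nlinarith
  have he : e = Int.sqrt m := by omega
  rw [heq] at hne
  exact hne he

theorem pairwiseB (m : Int) (hm : 1 ≤ m) :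
    (smallsB m 1 ++ (largesB m 1).reverse).Pairwise (· < ·) := by
  have hsq1 : 1 ≤ Int.sqrt m := sqrt_pos' m hm
  rw [List.pairwise_append]
  refine ⟨?_, ?_, ?_⟩
  · unfold smallsB
    exact List.Pairwise.map _ (fun a b hab => by omega)
      ((PySem.List.pairwise_lt_pyRange_one _ _).filter _)
  · unfold largesB
    rw [List.pairwise_reverse]
    refine List.Pairwise.map _ (fun a b hab => by omega : ∀ a b : Int,
      (PySem.Int.floordiv m b < PySem.Int.floordiv m a) →
        2 * PySem.Int.floordiv m b < 2 * PySem.Int.floordiv m a) ?_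
    refine List.Pairwise.imp_of_mem ?_ ((PySem.List.pairwise_lt_pyRange_one _ _).filter _)
    intro a b hain hbin hab
    rw [List.mem_filter] at hain hbin
    rw [PySem.List.mem_pyRange_one] at hain hbin
    have haa := hain.2
    have hbb := hbin.2
    rw [Bool.and_eq_true, beq_iff_eq] at haa hbb
    have hadvd : a ∣ m := (PySem.Int.mod_eq_zero_iff_dvd m a).1 haa.1
    have hbdvd : b ∣ m := (PySem.Int.mod_eq_zero_iff_dvd m b).1 hbb.1
    rw [PySem.Int.floordiv_eq_ediv_of_pos (by omega : (0:Int) < a),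
      PySem.Int.floordiv_eq_ediv_of_pos (by omega : (0:Int) < b)]
    exact div_strict_anti m a b hm hadvd hbdvd (by omega) hab
  · intro x hx y hy
    rw [List.mem_reverse] at hy
    unfold smallsB at hx
    unfold largesB at hy
    simp only [List.mem_map, List.mem_filter, PySem.List.mem_pyRange_one, Bool.and_eq_true,
      beq_iff_eq, bne_iff_ne] at hx hy
    obtain ⟨d, ⟨⟨hd1, hd2⟩, hdm⟩, rfl⟩ := hx
    obtain ⟨e, ⟨⟨he1, he2⟩, hem, hene⟩, rfl⟩ := hy
    have hfd : PySem.Int.floordiv m e = m / e := PySem.Int.floordiv_eq_ediv_of_pos (by omega)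
    rw [hfd] at hene ⊢
    have := cofactor_large m e hm (by omega) (by omega)
      ((PySem.Int.mod_eq_zero_iff_dvd m e).1 hem) hene
    omega

theorem f_zero : f 0 = [0] := by
  rw [f_eq_sorted]
  have h1 : Int.sqrt 0 = 0 := by simp [Int.sqrt]
  rw [h1, PySem.List.pyRange_one_eq_nil (by omega)]
  decide

theorem f_alt_zero : f_alt 0 = [] := by decide

-- ===== VERDICT =====
theorem f_spec : Claim_unchanged_f := by
  intro n hdom hpre
  unfold Spec_f
  intro hD
  unfold Pre_f at hpre
  unfold D_f at hD
  have hn1 : 1 ≤ n := by omega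
  rw [f_eq_sorted]
  by_cases hpar : PySem.Int.mod n 2 = 0
  · have hdvd2 : (2:Int) ∣ n := (PySem.Int.mod_eq_zero_iff_dvd n 2).1 hpar
    have hfd2 : PySem.Int.floordiv n 2 = n / 2 := PySem.Int.floordiv_eq_ediv_of_pos (by omega)
    have hmul : n / 2 * 2 = n := Int.ediv_mul_cancel hdvd2
    have hm1 : 1 ≤ n / 2 := by omega
    rw [f_alt_eq n (by omega) hpar, hfd2]
    have hnodupL : (smallsB (n / 2) 1 ++ (largesB (n / 2) 1).reverse).Nodup :=
      (pairwiseB (n / 2) hm1).imp (fun h => ne_of_lt h)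
    apply PySem.List.sorted_eq_of_perm_of_pairwise_lt
    · rw [List.perm_ext_iff_of_nodup hnodupL (PySem.Set.nodup_ofList _)]
      intro a
      rw [PySem.Set.mem_ofList, memA n a hn1, memB (n / 2) a hm1]
      constructor
      · rintro ⟨d, hdm, hd0, rfl⟩
        refine ⟨⟨d, rfl⟩, ?_, by omega⟩
        have hdd : 2 * d ∣ 2 * (n / 2) := mul_dvd_mul_left 2 hdm
        have hn2 : 2 * (n / 2) = n := by omega
        rwa [hn2] at hdd
      · rintro ⟨⟨c, rfl⟩, hxn, hpos⟩
        refine ⟨c, ?_, by omega, rfl⟩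
        have hn2 : n = 2 * (n / 2) := by omega
        rw [hn2] at hxn
        exact (mul_dvd_mul_iff_left (by omega : (2:Int) ≠ 0)).1 hxn
    · exact pairwiseB (n / 2) hm1
  · have hndvd : ¬ (2:Int) ∣ n := fun hdd => hpar ((PySem.Int.mod_eq_zero_iff_dvd n 2).2 hdd)
    have halt : f_alt n = [] := by
      simp [f_alt, hndvd]
    rw [halt]
    have hsA : (if PySem.Int.mod n 2 = 0 then ([n] : List Int) else []) ++
        (PySem.List.pyRange 2 (Int.sqrt n + 1) 1).flatMap (bodyA n) = [] := by
      rw [List.eq_nil_iff_forall_not_mem]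
      intro x hx
      obtain ⟨h2, hdvd, _⟩ := (memA n x hn1).1 hx
      exact hpar ((PySem.Int.mod_eq_zero_iff_dvd n 2).2 (dvd_trans h2 hdvd))
    rw [hsA]
    rfl

theorem f_changed : Claim_changed_f := by
  unfold Claim_changed_f
  exact ⟨by decide, by decide, by decide, f_zero, f_alt_zero, by decide⟩

theorem f_tight : Claim_exact_f := by
  intro n _ _ hD
  unfold D_f at hD
  subst hD
  rw [f_zero, f_alt_zero]
  simp
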